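/-
  jsmn_s.bin (-DJSMN_STRICT -DJSMN_PARENT_LINKS): THE ASSEMBLY — from the contracts of the single functions to closed statements, bottom-up:
      jsmn_init                             init_spec                                 Prog/Jsmn/S/Init.lean       PROVED
      jsmn_run                              run_spec from InitSpec, ParseSpec         Prog/Jsmn/S/Run.lean        PROVED
      jsmn_main                             main_spec from RunSpec                    Prog/Jsmn/S/Main.lean       PROVED
      the pure facts                        Jsmn.safeFacts                            Json/Jsmn/Safe.lean         PROVED
  TAKEN AS HYPOTHESES HERE (the fields of `Pending` below) and proved in Prog/Jsmn/S/Closed.lean: jsmn_alloc_token and jsmn_fill_token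
  (`alloc_spec n`, `fill_spec n` of Prog/Jsmn/S/Alloc.lean, which is not imported here), jsmn_parse_primitive (`prim_spec`), jsmn_parse_string
  (`str_spec`) and jsmn_parse (ONE field, from the pure facts and the three callees' contracts: `parse_spec` of Prog/Jsmn/S/Parse.lean applied to
  the six case regions).
  There `theorem pending (n) : Pending n := ⟨alloc_spec n, fill_spec n, prim_spec, str_spec, …⟩` closes everything in this file.
-/
import Prog.Jsmn.S.Init
import Prog.Jsmn.S.Run
import Prog.Jsmn.S.Main
import Json.Jsmn.Safe

namespace X86
namespace J6
namespace S
open X86.User (CodeAt RegsKept Span FlagsOK Layout toNat_add_ofNat toNat_ofNat_lt' add_ofNat_add)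
open Jsmn

/-- The contracts of jsmn_alloc_token, jsmn_fill_token, jsmn_parse_primitive, jsmn_parse_string and jsmn_parse for jsmn_s.bin: taken as
hypotheses in this file, proved in Prog/Jsmn/S/Closed.lean (`pending`). -/
structure Pending (n : User.Layout) : Prop where
  /-- jsmn_alloc_token (Prog/Jsmn/S/Alloc.lean: `alloc_spec n`) -/
  alloc : AllocSpec binS n
  /-- jsmn_fill_token (Prog/Jsmn/S/Alloc.lean: `fill_spec n`) -/
  fill : FillSpec binS n
  /-- jsmn_parse_primitive (Prog/Jsmn/S/Prim.lean) -/
  prim : AllocSpec binS n → FillSpec binS n → PrimSpec binS n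
  /-- jsmn_parse_string (Prog/Jsmn/S/Str.lean) -/
  str : AllocSpec binS n → FillSpec binS n → StrSpec binS n
  /-- jsmn_parse: all of it, from the pure facts and the contracts of the three functions it calls -/
  parse : SafeFacts binS.cfg → AllocSpec binS n → StrSpec binS n → PrimSpec binS n → ParseSpec binS n

variable {n : User.Layout}

/-- jsmn_parse_primitive of jsmn_s.bin computes `Jsmn.parsePrimitive`. -/
theorem prim_of (h : Pending n) : PrimSpec binS n := h.prim h.alloc h.fill

/-- jsmn_parse_string of jsmn_s.bin computes `Jsmn.parseString`. -/
theorem str_of (h : Pending n) : StrSpec binS n := h.str h.alloc h.fill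

/-- **jsmn_parse of jsmn_s.bin computes `Jsmn.parseFuel`** (under `Inv`). -/
theorem parse_of (h : Pending n) : ParseSpec binS n := h.parse (Jsmn.safeFacts binS.cfg) h.alloc (str_of h) (prim_of h)

/-- **jsmn_run of jsmn_s.bin computes `Jsmn.parseFuel` from `Parser.init`.** -/
theorem run_of (h : Pending n) : RunSpec binS n := run_spec (Jsmn.safeFacts binS.cfg) (init_spec n) (parse_of h)

/-- **jsmn_main of jsmn_s.bin leaves `encodeResult r tokens` at `out` and returns its length.** -/
theorem main_of (h : Pending n) : MainSpec binS n := main_spec (run_of h)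

/-- The same two, from a finished `ParseSpec` alone. -/
theorem run_of_parse (hparse : ParseSpec binS n) : RunSpec binS n := run_spec (Jsmn.safeFacts binS.cfg) (init_spec n) hparse
theorem main_of_parse (hparse : ParseSpec binS n) : MainSpec binS n := main_spec (run_of_parse hparse)

end S
end J6
end X86
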